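-- pv_equiv track=rewrite | github.com/EleniAndrlk/python_progects_Sept20 | ex1.py | count_sos
-- ===== SOURCE A (Python) =====
-- def count_sos(list_given):
--     counter = 0
--     list_combination = []
--     for item in list_given:
--         if len(list_combination) == 0:
--             if item == 'S':
--                 list_combination.append(item)
--
--         elif len(list_combination) == 1:
--             if item == 'S':
--                 list_combination.clear()
--
--             list_combination.append(item)
--
--         else:
--             list_combination.clear()
--             if item == 'S':
--                 counter +=1
--                 # ginetai prosthiki stin lista to teleutaio S giati mporei na anhkei kai se epomeno px SOSOS
--                 list_combination.append(item)
--
--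
--     list_combination.clear()
--     return counter
-- ===== SOURCE B (Python) =====
-- def count_sos(list_given):
--     s = list(list_given)
--     return sum(1 for a, b, c in zip(s, s[1:], s[2:])
--                if a == 'S' and b != 'S' and c == 'S')
-- ===== Notes on version B (the rewrite author's own statement) =====
-- stated objective: simpler
-- what changed: Replaced the mutable state-buffer automaton with a direct fixed-window scan counting indices whose triple is ('S', non-'S', 'S').
import Mathlib
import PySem

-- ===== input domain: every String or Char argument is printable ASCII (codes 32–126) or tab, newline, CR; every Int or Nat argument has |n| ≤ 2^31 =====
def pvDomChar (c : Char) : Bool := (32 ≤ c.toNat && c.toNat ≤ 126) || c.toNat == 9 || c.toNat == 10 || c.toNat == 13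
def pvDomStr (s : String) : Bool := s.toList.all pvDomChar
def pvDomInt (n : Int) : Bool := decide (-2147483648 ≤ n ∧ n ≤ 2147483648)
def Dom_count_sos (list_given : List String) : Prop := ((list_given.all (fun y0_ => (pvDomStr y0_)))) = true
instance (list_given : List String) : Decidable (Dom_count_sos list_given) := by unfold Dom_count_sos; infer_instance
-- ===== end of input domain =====

-- B replaces A's mutable state-buffer automaton with a direct three-element window scan (same cost, simpler).
-- ===== PORT A =====
-- one step of A's loop body on the state (counter, list_combination)
def sosStep (st : Int × List String) (item : String) : Int × List String :=
  if st.2.length = 0 then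
    (st.1, if item = "S" then st.2 ++ [item] else st.2)
  else if st.2.length = 1 then
    (st.1, (if item = "S" then ([] : List String) else st.2) ++ [item])
  else
    if item = "S" then (st.1 + 1, [item]) else (st.1, [])

def count_sos (list_given : List String) : Int :=
  (list_given.foldl sosStep (0, [])).1

-- ===== PORT B =====
-- count of windows (a,b,c) of consecutive elements with a='S', b≠'S', c='S'
def sosWindows : List String → Int
  | a :: b :: c :: t =>
      (if a = "S" ∧ b ≠ "S" ∧ c = "S" then 1 else 0) + sosWindows (b :: c :: t)
  | _ => 0

def count_sos_alt (list_given : List String) : Int :=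
  sosWindows list_given

-- ===== PRECONDITION & SPEC =====
def Spec_count_sos (list_given : List String) (out : Int) : Prop := out = count_sos_alt list_given
instance (list_given : List String) (out : Int) : Decidable (Spec_count_sos list_given out) := by unfold Spec_count_sos; infer_instance

-- ===== CLAIM (what is proved, stated in full; the proofs are below) =====
def Claim_equal_count_sos : Prop := ∀ (list_given : List String), Dom_count_sos list_given → Spec_count_sos list_given (count_sos list_given)

-- ===== LEMMAS AND PROOFS =====

-- a window starting at a non-'S' element contributes nothing
theorem sosWindows_cons_ne (x : String) (l : List String) (hx : x ≠ "S") :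
    sosWindows (x :: l) = sosWindows l := by
  match l with
  | [] => rfl
  | [b] => rfl
  | b :: c :: t => simp [sosWindows, hx]

-- a window 'S','S' at the front cannot match (middle must differ from 'S')
theorem sosWindows_SS (l : List String) :
    sosWindows ("S" :: "S" :: l) = sosWindows ("S" :: l) := by
  match l with
  | [] => rfl
  | b :: t => simp [sosWindows]

-- invariant of A's fold over the three reachable buffer shapes
theorem sos_fold_inv (l : List String) : ∀ (c : Int),
    ((l.foldl sosStep (c, [])).1 = c + sosWindows l)
    ∧ ((l.foldl sosStep (c, ["S"])).1 = c + sosWindows ("S" :: l))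
    ∧ (∀ x, x ≠ "S" → (l.foldl sosStep (c, ["S", x])).1 = c + sosWindows ("S" :: x :: l)) := by
  induction l with
  | nil =>
    intro c
    refine ⟨by simp [sosWindows], by simp [sosWindows], ?_⟩
    intro x hx; simp [sosWindows]
  | cons item t ih =>
    intro c
    by_cases hi : item = "S"
    · subst hi
      refine ⟨?_, ?_, ?_⟩
      · simpa [List.foldl, sosStep] using (ih c).2.1
      · have := (ih c).2.1
        simpa [List.foldl, sosStep, sosWindows_SS] using this
      · intro x hx
        have h1 : sosWindows (x :: "S" :: t) = sosWindows ("S" :: t) :=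
          sosWindows_cons_ne x _ hx
        have := (ih (c + 1)).2.1
        simp [List.foldl, sosStep]
        simp [sosWindows, hx, h1]
        omega
    · refine ⟨?_, ?_, ?_⟩
      · have := (ih c).1
        have h1 : sosWindows (item :: t) = sosWindows t :=
          sosWindows_cons_ne item t hi
        simp [List.foldl, sosStep, hi]
        omega
      · have := (ih c).2.2 item hi
        simpa [List.foldl, sosStep, hi] using this
      · intro x hx
        have := (ih c).1
        have h1 : sosWindows (item :: t) = sosWindows t :=
          sosWindows_cons_ne item t hi
        have h2 : sosWindows (x :: item :: t) = sosWindows (item :: t) :=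
          sosWindows_cons_ne x _ hx
        simp [List.foldl, sosStep, hi]
        simp [sosWindows, hi, h2, h1]
        omega

-- ===== VERDICT =====
theorem count_sos_spec : Claim_equal_count_sos := by
  intro l _
  unfold Spec_count_sos count_sos count_sos_alt
  simpa using ((sos_fold_inv l 0).1)
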